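-- pv_equiv track=rewrite | github.com/baldmike/baseball-game | backend/app/services/game_engine.py | _advance_runners_hit
-- ===== SOURCE A (Python) =====
-- def _advance_runners_hit(bases: list[bool], hit_type: str) -> int:
--     """
--     Advance runners based on the type of hit.
--
--     This is a simplified model of base running:
--     - Single: Each runner advances one base. Runner on 3rd scores.
--       The batter takes 1st.
--     - Double: Runners on 2nd and 3rd score. Runner on 1st goes to 3rd.
--       The batter takes 2nd.
--     - Triple: All runners score. The batter takes 3rd.
--     - Homerun: All runners score AND the batter scores.
--
--     Real baseball has more complex base-running (runners can advance
--     extra bases on certain hits, get thrown out, etc.), but this simplified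
--     model captures the essential scoring mechanics.
--
--     The bases list is mutated in-place: bases[0]=1st, bases[1]=2nd, bases[2]=3rd.
--     """
--     runs = 0
--     if hit_type == "single":
--         # Runner on 3rd scores
--         if bases[2]:
--             runs += 1
--             bases[2] = False
--         # Runner on 2nd advances to 3rd
--         if bases[1]:
--             bases[2] = True
--             bases[1] = False
--         # Runner on 1st advances to 2nd
--         if bases[0]:
--             bases[1] = True
--             bases[0] = False
--         # Batter takes 1st base
--         bases[0] = True
--     elif hit_type == "double":
--         # Runner on 3rd scores
--         if bases[2]:
--             runs += 1
--         # Runner on 2nd scores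
--         if bases[1]:
--             runs += 1
--         # Runner on 1st advances to 3rd (not home — realistic for a double)
--         if bases[0]:
--             bases[2] = True
--             bases[0] = False
--         else:
--             # No runner on 1st, so 3rd base is only occupied if someone was already there
--             # (but they scored above), so clear it
--             bases[2] = False
--         # Batter takes 2nd base
--         bases[1] = True
--     elif hit_type == "triple":
--         # All runners score
--         for i in range(3):
--             if bases[i]:
--                 runs += 1
--                 bases[i] = False
--         # Batter takes 3rd base
--         bases[2] = True
--     elif hit_type == "homerun":
--         # All runners score
--         for i in range(3):
--             if bases[i]:
--                 runs += 1
--                 bases[i] = False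
--         # Batter also scores (rounds all the bases)
--         runs += 1
--     return runs
-- ===== SOURCE B (Python) =====
-- def _advance_runners_hit(bases: list[bool], hit_type: str) -> int:
--     # One uniform advancement rule instead of four per-hit branches:
--     # every runner (and the batter, at position 0) advances by the same amount.
--     ADVANCE = {"single": 1, "double": 2, "triple": 3, "homerun": 4}
--     adv = ADVANCE.get(hit_type)
--     if adv is None:
--         return 0
--     runs = 0
--     new = [False, False, False]
--     starts = [0] + [i + 1 for i in range(3) if bases[i]]
--     for start in starts:
--         dest = start + adv
--         if dest >= 4:
--             runs += 1
--         else: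
--             new[dest - 1] = True
--     bases[:3] = new
--     return runs
-- ===== Notes on version B (the rewrite author's own statement) =====
-- stated objective: simpler
-- what changed: Replaces the four per-hit-type branch bodies with one uniform rule: map the hit type to an advance count and move the batter and every occupied base forward by that amount, scoring anyone who reaches position 4.
import Mathlib
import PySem

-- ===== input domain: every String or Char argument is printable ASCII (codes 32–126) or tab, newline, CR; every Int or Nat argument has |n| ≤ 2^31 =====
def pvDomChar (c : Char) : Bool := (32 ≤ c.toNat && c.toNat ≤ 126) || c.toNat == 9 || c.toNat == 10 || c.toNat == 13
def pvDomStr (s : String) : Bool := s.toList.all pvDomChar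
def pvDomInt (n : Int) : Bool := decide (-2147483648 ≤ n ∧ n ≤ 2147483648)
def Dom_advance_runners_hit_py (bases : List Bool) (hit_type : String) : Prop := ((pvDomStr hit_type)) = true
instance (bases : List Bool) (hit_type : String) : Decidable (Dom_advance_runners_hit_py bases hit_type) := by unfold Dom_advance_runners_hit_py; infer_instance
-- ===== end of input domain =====

-- B replaces A's four per-hit branch bodies by one uniform advancement rule (same cost);
-- the in-place mutation of `bases` is matched by B in Python, but the theorems here are about the RETURN value only.

-- ===== PORT A =====
-- literal transliteration of A; bases[i] reads use PySem.List.pyGetD (exact under Pre_,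
-- which guarantees the indices 0..2 are in range whenever they are read)
def advance_runners_hit_py (bases : List Bool) (hit_type : String) : Int :=
  let runs : Int := 0
  if hit_type = "single" then
    let (runs, bases) :=
      if PySem.List.pyGetD bases 2 false then (runs + 1, bases.set 2 false) else (runs, bases)
    let bases :=
      if PySem.List.pyGetD bases 1 false then ((bases.set 2 true).set 1 false) else bases
    let bases :=
      if PySem.List.pyGetD bases 0 false then ((bases.set 1 true).set 0 false) else bases
    let _bases := bases.set 0 true
    runs
  else if hit_type = "double" then
    let runs := if PySem.List.pyGetD bases 2 false then runs + 1 else runs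
    let runs := if PySem.List.pyGetD bases 1 false then runs + 1 else runs
    let bases :=
      if PySem.List.pyGetD bases 0 false then ((bases.set 2 true).set 0 false)
      else bases.set 2 false
    let _bases := bases.set 1 true
    runs
  else if hit_type = "triple" then
    let (runs, bases) :=
      (PySem.List.pyRange 0 3 1).foldl
        (fun (st : Int × List Bool) i =>
          if PySem.List.pyGetD st.2 i false then (st.1 + 1, st.2.set i.toNat false) else st)
        (runs, bases)
    let _bases := bases.set 2 true
    runs
  else if hit_type = "homerun" then
    let (runs, _bases) :=
      (PySem.List.pyRange 0 3 1).foldl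
        (fun (st : Int × List Bool) i =>
          if PySem.List.pyGetD st.2 i false then (st.1 + 1, st.2.set i.toNat false) else st)
        (runs, bases)
    runs + 1
  else
    runs

-- ===== PORT B =====
-- transliteration of Source B: look up the advance count, move batter (0) and each occupied
-- base i (position i+1) forward by it; dest ∈ {1,2,3} in the else-branch, so (dest-1).toNat is exact
def advance_runners_hit_py_alt (bases : List Bool) (hit_type : String) : Int :=
  match (PySem.Dict.ofList [("single", (1 : Int)), ("double", 2), ("triple", 3), ("homerun", 4)]).get? hit_type with
  | none => 0
  | some adv =>
    let starts : List Int :=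
      0 :: (((PySem.List.pyRange 0 3 1).filter (fun i => PySem.List.pyGetD bases i false)).map (· + 1))
    let (runs, _new) :=
      starts.foldl
        (fun (st : Int × List Bool) start =>
          let dest := start + adv
          if dest ≥ 4 then (st.1 + 1, st.2) else (st.1, st.2.set (dest - 1).toNat true))
        ((0 : Int), [false, false, false])
    runs

-- ===== PRECONDITION & SPEC =====
-- Pre_ excludes exactly the inputs on which Python A raises IndexError:
-- a recognized hit type with fewer than 3 bases.
def Pre_advance_runners_hit_py (bases : List Bool) (hit_type : String) : Prop :=
  (hit_type = "single" ∨ hit_type = "double" ∨ hit_type = "triple" ∨ hit_type = "homerun") →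
    3 ≤ bases.length
instance (bases : List Bool) (hit_type : String) : Decidable (Pre_advance_runners_hit_py bases hit_type) := by unfold Pre_advance_runners_hit_py; infer_instance
def pvWitness_advance_runners_hit_py : List Bool × String := ([true, false, true], "double")
def Spec_advance_runners_hit_py (bases : List Bool) (hit_type : String) (out : Int) : Prop := out = advance_runners_hit_py_alt bases hit_type
instance (bases : List Bool) (hit_type : String) (out : Int) : Decidable (Spec_advance_runners_hit_py bases hit_type out) := by unfold Spec_advance_runners_hit_py; infer_instance

-- ===== CLAIM (what is proved, stated in full; the proofs are below) =====
def Claim_equal_advance_runners_hit_py : Prop := ∀ (bases : List Bool) (hit_type : String), Dom_advance_runners_hit_py bases hit_type → Pre_advance_runners_hit_py bases hit_type → Spec_advance_runners_hit_py bases hit_type (advance_runners_hit_py bases hit_type)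

-- ===== LEMMAS AND PROOFS =====

lemma pv_get?_none (hit_type : String)
    (h1 : ¬ hit_type = "single") (h2 : ¬ hit_type = "double")
    (h3 : ¬ hit_type = "triple") (h4 : ¬ hit_type = "homerun") :
    (PySem.Dict.ofList [("single", (1 : Int)), ("double", 2), ("triple", 3), ("homerun", 4)]).get? hit_type = none := by
  have hd : PySem.Dict.ofList [("single", (1 : Int)), ("double", 2), ("triple", 3), ("homerun", 4)]
      = PySem.Dict.mk [("single", (1 : Int)), ("double", 2), ("triple", 3), ("homerun", 4)] := by decide
  rw [hd, PySem.Dict.get?_mk_cons, PySem.Dict.get?_mk_cons, PySem.Dict.get?_mk_cons,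
    PySem.Dict.get?_mk_cons]
  simp [Ne.symm h1, Ne.symm h2, Ne.symm h3, Ne.symm h4, PySem.Dict.get?]

lemma pv_unknown (bases : List Bool) (hit_type : String)
    (h1 : ¬ hit_type = "single") (h2 : ¬ hit_type = "double")
    (h3 : ¬ hit_type = "triple") (h4 : ¬ hit_type = "homerun") :
    advance_runners_hit_py bases hit_type = advance_runners_hit_py_alt bases hit_type := by
  simp [advance_runners_hit_py, advance_runners_hit_py_alt, h1, h2, h3, h4,
    pv_get?_none hit_type h1 h2 h3 h4]

lemma pv_get?_single :
    (PySem.Dict.ofList [("single", (1 : Int)), ("double", 2), ("triple", 3), ("homerun", 4)]).get? "single" = some 1 := by decide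
lemma pv_get?_double :
    (PySem.Dict.ofList [("single", (1 : Int)), ("double", 2), ("triple", 3), ("homerun", 4)]).get? "double" = some 2 := by decide
lemma pv_get?_triple :
    (PySem.Dict.ofList [("single", (1 : Int)), ("double", 2), ("triple", 3), ("homerun", 4)]).get? "triple" = some 3 := by decide
lemma pv_get?_homerun :
    (PySem.Dict.ofList [("single", (1 : Int)), ("double", 2), ("triple", 3), ("homerun", 4)]).get? "homerun" = some 4 := by decide

lemma pv_known (b0 b1 b2 : Bool) (t : List Bool) (hit_type : String)
    (h : hit_type = "single" ∨ hit_type = "double" ∨ hit_type = "triple" ∨ hit_type = "homerun") :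
    advance_runners_hit_py (b0 :: b1 :: b2 :: t) hit_type
      = advance_runners_hit_py_alt (b0 :: b1 :: b2 :: t) hit_type := by
  rcases h with h | h | h | h <;> subst h <;> cases b0 <;> cases b1 <;> cases b2 <;>
    simp [advance_runners_hit_py, advance_runners_hit_py_alt, PySem.List.pyGetD_ofNat',
      PySem.List.pyRange, List.range_succ,
      pv_get?_single, pv_get?_double, pv_get?_triple, pv_get?_homerun]

-- ===== VERDICT (by name: the statement is the Claim_ definition above) =====
theorem advance_runners_hit_py_spec : Claim_equal_advance_runners_hit_py := by
  intro bases hit_type _ hpre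
  unfold Spec_advance_runners_hit_py
  by_cases h : hit_type = "single" ∨ hit_type = "double" ∨ hit_type = "triple" ∨ hit_type = "homerun"
  · have hlen := hpre h
    match bases, hlen with
    | b0 :: b1 :: b2 :: t, _ => exact pv_known b0 b1 b2 t hit_type h
  · push_neg at h
    exact pv_unknown bases hit_type h.1 h.2.1 h.2.2.1 h.2.2.2
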